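-- pv_equiv track=rewrite | github.com/codingARa/AdventOfCode2025 | day05/day05.py | parse_input_lines
-- ===== SOURCE A (Python) =====
-- def parse_input_lines(lines: str) -> tuple[list[str], list[str]]:
--     breakline = False
--     ranges = []
--     orders = []
--     for line in lines:
--         line = line.strip()
--         if line == "":
--             breakline = True
--             continue
--         if breakline:
--             orders.append(line)
--         else:
--             ranges.append(line)
--     return ranges, orders
-- ===== SOURCE B (Python) =====
-- def parse_input_lines(lines: str) -> tuple[list[str], list[str]]:
--     stripped = [line.strip() for line in lines]
--     cut = next((i for i, s in enumerate(stripped) if s == ""), len(stripped))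
--     ranges = stripped[:cut]
--     orders = [s for s in stripped[cut:] if s != ""]
--     return ranges, orders
-- ===== Notes on version B (the rewrite author's own statement) =====
-- stated objective: simpler
-- what changed: Replaces the stateful breakline-flag loop by a stateless decomposition: strip all lines once, locate the first blank line's index, and build the two halves by slicing (prefix, and the non-blank entries of the suffix).
import Mathlib
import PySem

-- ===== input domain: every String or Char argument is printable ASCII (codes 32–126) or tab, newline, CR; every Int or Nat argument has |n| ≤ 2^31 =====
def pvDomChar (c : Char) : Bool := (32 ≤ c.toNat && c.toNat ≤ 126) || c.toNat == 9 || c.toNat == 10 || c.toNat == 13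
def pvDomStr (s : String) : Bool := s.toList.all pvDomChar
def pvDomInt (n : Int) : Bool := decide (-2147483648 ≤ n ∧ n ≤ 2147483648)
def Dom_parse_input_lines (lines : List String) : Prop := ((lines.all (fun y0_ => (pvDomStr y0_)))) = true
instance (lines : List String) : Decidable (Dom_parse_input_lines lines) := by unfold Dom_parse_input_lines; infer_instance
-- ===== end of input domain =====

-- B replaces A's stateful breakline-flag loop by strip-once, find the first blank's index, slice; objective: simpler.

-- ===== PORT A =====
def parse_input_lines (lines : List String) : List String × List String :=
  let st := lines.foldl (fun (st : Bool × List String × List String) line =>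
    let l := PySem.Str.strip line
    if l == "" then (true, st.2.1, st.2.2)
    else if st.1 then (st.1, st.2.1, st.2.2 ++ [l])
    else (st.1, st.2.1 ++ [l], st.2.2)) (false, [], [])
  (st.2.1, st.2.2)

-- ===== PORT B =====
def parse_input_lines_alt (lines : List String) : List String × List String :=
  let stripped := lines.map PySem.Str.strip
  let cut := stripped.findIdx (· == "")
  let ranges := stripped.take cut
  let orders := (stripped.drop cut).filter (fun s => !(s == ""))
  (ranges, orders)

-- ===== PRECONDITION & SPEC =====
def Spec_parse_input_lines (lines : List String) (out : List String × List String) : Prop := out = parse_input_lines_alt lines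
instance (lines : List String) (out : List String × List String) : Decidable (Spec_parse_input_lines lines out) := by unfold Spec_parse_input_lines; infer_instance

-- ===== CLAIM (what is proved, stated in full; the proofs are below) =====
def Claim_equal_parse_input_lines : Prop := ∀ (lines : List String), Dom_parse_input_lines lines → Spec_parse_input_lines lines (parse_input_lines lines)

-- ===== LEMMAS AND PROOFS =====

def pvStepA (st : Bool × List String × List String) (line : String) :
    Bool × List String × List String :=
  let l := PySem.Str.strip line
  if l == "" then (true, st.2.1, st.2.2)
  else if st.1 then (st.1, st.2.1, st.2.2 ++ [l])
  else (st.1, st.2.1 ++ [l], st.2.2)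

-- after the breakline flag is set, the fold only appends the non-blank stripped lines to orders
theorem foldA_true (ls : List String) (r o : List String) :
    ls.foldl pvStepA (true, r, o)
      = (true, r, o ++ (ls.map PySem.Str.strip).filter (fun s => !(s == ""))) := by
  induction ls generalizing o with
  | nil => simp
  | cons h t ih =>
      by_cases hb : PySem.Str.strip h == ""
      · simp [List.foldl_cons, pvStepA, hb, ih]
      · simp [List.foldl_cons, pvStepA, hb, ih]

-- from an unset flag, the fold computes the split at the first blank stripped line
theorem foldA_false (ls : List String) (r o : List String) :
    (ls.foldl pvStepA (false, r, o)).2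
      = (r ++ (ls.map PySem.Str.strip).take ((ls.map PySem.Str.strip).findIdx (· == "")),
         o ++ ((ls.map PySem.Str.strip).drop ((ls.map PySem.Str.strip).findIdx (· == ""))).filter
              (fun s => !(s == ""))) := by
  induction ls generalizing r o with
  | nil => simp
  | cons h t ih =>
      by_cases hb : PySem.Str.strip h == ""
      · simp [List.foldl_cons, pvStepA, hb, foldA_true, List.findIdx_cons]
      · simp [List.foldl_cons, pvStepA, hb, ih, List.findIdx_cons]

-- ===== VERDICT (by name: the statement is the Claim_ definition above) =====
theorem parse_input_lines_spec : Claim_equal_parse_input_lines := by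
  intro lines _
  show _ = _
  have h := foldA_false lines [] []
  simp only [parse_input_lines, parse_input_lines_alt]
  have : (lines.foldl pvStepA (false, [], [])).2
      = ((lines.map PySem.Str.strip).take ((lines.map PySem.Str.strip).findIdx (· == "")),
         ((lines.map PySem.Str.strip).drop ((lines.map PySem.Str.strip).findIdx (· == ""))).filter
            (fun s => !(s == ""))) := by simpa using h
  show ((lines.foldl pvStepA (false, [], [])).2.1, (lines.foldl pvStepA (false, [], [])).2.2) = _
  rw [this]
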